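-- pv_equiv track=rewrite | github.com/MaksimAka/ege | 24-02-2025/Task-25-1867.py | f
-- ===== SOURCE A (Python) =====
-- def f(num):
--     dell = []
--     for i in range(2, int(num**0.5)+1):
--         if num % i == 0:
--             dell.append(i)
--             dell.append(num//i)
--     dell = sorted(set(dell))
--
--     for i in dell:
--         if i % 10 == 8 and i != 8:
--             return i
--     return 0
-- ===== SOURCE B (Python) =====
-- def f(num):
--     # single sqrt-bounded scan: return first small qualifying divisor (ascending),
--     # otherwise keep the last (= smallest) qualifying cofactor
--     big = 0
--     i = 2
--     while i * i <= num:
--         if num % i == 0: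
--             if i % 10 == 8 and i != 8:
--                 return i
--             d = num // i
--             if d % 10 == 8 and d != 8:
--                 big = d
--         i += 1
--     return big
-- ===== Notes on version B (the rewrite author's own statement) =====
-- stated objective: simpler
-- what changed: A enumerates all divisor pairs up to sqrt(num) into a list, deduplicates with set(), sorts, then scans for the first divisor ending in 8; B is a single sqrt-bounded loop that returns the first qualifying small divisor immediately and otherwise keeps one running cofactor candidate (the last qualifying num//i, which is the smallest), building no list and sorting nothing.
-- crash fix: On num < 0 A raises TypeError (int() of the complex value num**0.5); B's loop never starts and it returns 0. — e.g. on f(-5): A raises TypeError, B returns 0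
import Mathlib
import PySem

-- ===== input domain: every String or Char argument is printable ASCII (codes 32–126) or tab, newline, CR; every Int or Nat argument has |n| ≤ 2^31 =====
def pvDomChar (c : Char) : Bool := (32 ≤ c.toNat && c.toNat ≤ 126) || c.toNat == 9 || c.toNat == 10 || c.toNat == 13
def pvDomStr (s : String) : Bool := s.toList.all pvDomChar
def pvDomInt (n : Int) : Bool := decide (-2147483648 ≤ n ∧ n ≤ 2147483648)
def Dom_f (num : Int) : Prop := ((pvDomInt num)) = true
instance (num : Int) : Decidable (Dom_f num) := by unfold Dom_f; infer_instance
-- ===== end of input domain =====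

-- B replaces A's build-all-divisor-pairs / dedup / sort / scan pipeline with one sqrt-bounded
-- loop keeping a single running cofactor candidate (objective: simpler, no list is built).

-- B replaces A's build-all-divisor-pairs / dedup / sort / scan pipeline with a single
-- sqrt-bounded loop keeping one running cofactor candidate (objective: simpler; no list is built).

-- ===== PORT A =====
-- int(num**0.5) is ported as Nat.sqrt num.toNat: exact for 0 ≤ num ≤ 2^31 (double sqrt
-- cannot cross an integer there); Pre_f excludes num < 0, where the Python raises TypeError.
def f (num : Int) : Int :=
  let dell : List Int :=
    (PySem.List.pyRange 2 (((Nat.sqrt num.toNat : Nat) : Int) + 1) 1).foldl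
      (fun acc i =>
        if PySem.Int.mod num i = 0 then acc ++ [i, PySem.Int.floordiv num i] else acc) []
  let dell2 := PySem.List.sorted (PySem.Set.ofList dell) (fun x => x) false
  match dell2.find? (fun i => decide (PySem.Int.mod i 10 = 8 ∧ i ≠ 8)) with
  | some i => i
  | none => 0

-- ===== PORT B =====
-- the 'while i * i <= num' loop of Source B: early return on a small qualifying divisor,
-- otherwise 'big' keeps the last (= smallest) qualifying cofactor
def fAltLoop (num big i : Int) : Int :=
  if h : i * i ≤ num then
    if PySem.Int.mod num i = 0 then
      if PySem.Int.mod i 10 = 8 ∧ i ≠ 8 then i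
      else
        fAltLoop num
          (if PySem.Int.mod (PySem.Int.floordiv num i) 10 = 8 ∧ PySem.Int.floordiv num i ≠ 8
           then PySem.Int.floordiv num i else big) (i + 1)
    else fAltLoop num big (i + 1)
  else big
termination_by (num + 1 - i).toNat
decreasing_by
  all_goals
    have hii : i ≤ i * i := by nlinarith [mul_self_nonneg i, mul_self_nonneg (i - 1)]
    omega

def f_alt (num : Int) : Int := fAltLoop num 0 2

-- ===== PRECONDITION & SPEC =====
-- Pre_f excludes num < 0, where A raises TypeError (int() of a complex square root).
def Pre_f (num : Int) : Prop := 0 ≤ num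
instance (num : Int) : Decidable (Pre_f num) := by unfold Pre_f; infer_instance
def pvWitness_f : Int := 56

-- On negative num A raises TypeError (int(num**0.5) of a complex number); B returns 0
-- (made checkable by Claim_raises_f, proved as f_raises at the bottom).
def Raises_f (num : Int) : Prop := num < 0
instance (num : Int) : Decidable (Raises_f num) := by unfold Raises_f; infer_instance
def pvRaiseWitness_f : Int := -5
def pvRaiseWitnessOut_f : Int := 0

def Spec_f (num : Int) (out : Int) : Prop := out = f_alt num
instance (num : Int) (out : Int) : Decidable (Spec_f num out) := by unfold Spec_f; infer_instance

-- ===== CLAIM (what is proved, stated in full; the proofs are below) =====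
def Claim_equal_f : Prop := ∀ (num : Int), Dom_f num → Pre_f num → Spec_f num (f num)
def Claim_raises_f : Prop := (∀ (num : Int), Dom_f num → Raises_f num → ¬ Pre_f num) ∧ (Dom_f (pvRaiseWitness_f) ∧ Raises_f (pvRaiseWitness_f) ∧ f_alt (pvRaiseWitness_f) = pvRaiseWitnessOut_f)

-- ===== LEMMAS AND PROOFS =====

-- the qualifying divisors both programs scan for: proper divisors of num ending in 8, other than 8
def Qd (num d : Int) : Prop :=
  2 ≤ d ∧ d < num ∧ d ∣ num ∧ PySem.Int.mod d 10 = 8 ∧ d ≠ 8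

-- the divisor list A builds (the same fold as inside f)
def dellList (num : Int) : List Int :=
  (PySem.List.pyRange 2 (((Nat.sqrt num.toNat : Nat) : Int) + 1) 1).foldl
    (fun acc i =>
      if PySem.Int.mod num i = 0 then acc ++ [i, PySem.Int.floordiv num i] else acc) []

-- reference value: the first qualifying divisor of a full ascending scan
def minQual (num : Int) : Int :=
  match (PySem.List.pyRange 2 num 1).find?
      (fun d => decide (PySem.Int.mod num d = 0 ∧ PySem.Int.mod d 10 = 8 ∧ d ≠ 8)) with
  | some d => d
  | none => 0

lemma find?_min_sorted {l : List Int} {p : Int → Bool} (hs : l.Pairwise (· ≤ ·)) :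
    ∀ {a : Int}, l.find? p = some a → a ∈ l ∧ p a = true ∧ ∀ b ∈ l, p b = true → a ≤ b := by
  induction l with
  | nil => intro a h; simp at h
  | cons x t ih =>
    intro a h
    rw [List.find?_cons] at h
    by_cases hx : p x = true
    · simp [hx] at h
      subst h
      refine ⟨List.mem_cons_self, hx, ?_⟩
      intro b hb _
      rcases List.mem_cons.mp hb with rfl | hb
      · exact le_refl _
      · exact (List.pairwise_cons.mp hs).1 b hb
    · simp [hx] at h
      obtain ⟨ha, hpa, hmin⟩ := ih (List.pairwise_cons.mp hs).2 h
      refine ⟨List.mem_cons_of_mem _ ha, hpa, ?_⟩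
      intro b hb hpb
      rcases List.mem_cons.mp hb with rfl | hb
      · exact absurd hpb hx
      · exact hmin b hb hpb

lemma find?_eq_find?_of_sorted {l₁ l₂ : List Int} {p₁ p₂ : Int → Bool}
    (h₁ : l₁.Pairwise (· ≤ ·)) (h₂ : l₂.Pairwise (· ≤ ·))
    (hm : ∀ x, (x ∈ l₁ ∧ p₁ x = true) ↔ (x ∈ l₂ ∧ p₂ x = true)) :
    l₁.find? p₁ = l₂.find? p₂ := by
  cases e₁ : l₁.find? p₁ with
  | none =>
    cases e₂ : l₂.find? p₂ with
    | none => rfl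
    | some b =>
      obtain ⟨hb, hpb, _⟩ := find?_min_sorted h₂ e₂
      obtain ⟨hb₁, hpb₁⟩ := (hm b).mpr ⟨hb, hpb⟩
      rw [List.find?_eq_none] at e₁
      exact absurd hpb₁ (e₁ b hb₁)
  | some a =>
    obtain ⟨ha, hpa, hmin⟩ := find?_min_sorted h₁ e₁
    cases e₂ : l₂.find? p₂ with
    | none =>
      obtain ⟨ha₂, hpa₂⟩ := (hm a).mp ⟨ha, hpa⟩
      rw [List.find?_eq_none] at e₂
      exact absurd hpa₂ (e₂ a ha₂)
    | some b =>
      obtain ⟨hb, hpb, hmin₂⟩ := find?_min_sorted h₂ e₂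
      obtain ⟨hb₁, hpb₁⟩ := (hm b).mpr ⟨hb, hpb⟩
      obtain ⟨ha₂, hpa₂⟩ := (hm a).mp ⟨ha, hpa⟩
      have u1 := hmin b hb₁ hpb₁
      have u2 := hmin₂ a ha₂ hpa₂
      exact congrArg some (le_antisymm u1 u2)

lemma int_le_sqrt {num j : Int} (hnum : 0 ≤ num) (hj : 0 ≤ j) :
    j ≤ ((Nat.sqrt num.toNat : Nat) : Int) ↔ j * j ≤ num := by
  rw [show j = (j.toNat : Int) by omega]
  rw [show num = (num.toNat : Int) by omega]
  have h := Nat.le_sqrt (m := j.toNat) (n := num.toNat)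
  constructor
  · intro hle
    have h1 : j.toNat ≤ Nat.sqrt num.toNat := by exact_mod_cast hle
    have := h.mp h1
    exact_mod_cast this
  · intro hle
    have h1 : j.toNat * j.toNat ≤ num.toNat := by exact_mod_cast hle
    have := h.mpr h1
    exact_mod_cast this

lemma mem_dellList {num x : Int} (hnum : 0 ≤ num) :
    x ∈ dellList num ↔ (2 ≤ x ∧ x < num ∧ x ∣ num) := by
  unfold dellList
  rw [PySem.List.foldl_congr_mem _
      (fun acc i => if PySem.Int.mod num i = 0 then acc ++ [i, PySem.Int.floordiv num i] else acc)
      (fun acc i => acc ++ (if PySem.Int.mod num i = 0 then [i, PySem.Int.floordiv num i] else []))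
      [] (by intro acc i _; beta_reduce; split <;> simp)]
  rw [PySem.List.foldl_append_eq_flatMap]
  simp only [List.nil_append, List.mem_flatMap, PySem.List.mem_pyRange_one]
  constructor
  · rintro ⟨j, ⟨hj2, hjlt⟩, hx⟩
    have hjs : j ≤ ((Nat.sqrt num.toNat : Nat) : Int) := by omega
    have hjj : j * j ≤ num := (int_le_sqrt hnum (by omega)).mp hjs
    by_cases hdvd : PySem.Int.mod num j = 0
    · have hjd : j ∣ num := (PySem.Int.mod_eq_zero_iff_dvd num j).mp hdvd
      rw [if_pos hdvd] at hx
      rw [PySem.Int.floordiv_eq_ediv_of_pos (by omega)] at hx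
      have hnume : num = j * (num / j) := (Int.mul_ediv_cancel' hjd).symm
      simp at hx
      rcases hx with rfl | rfl
      · exact ⟨hj2, by nlinarith, hjd⟩
      · have hd2 : j ≤ num / j := by nlinarith [hnume]
        refine ⟨by omega, by nlinarith [hnume], ⟨j, by linarith [hnume]⟩⟩
    · rw [if_neg hdvd] at hx; simp at hx
  · rintro ⟨hx2, hxlt, hxd⟩
    have hnum3 : 3 ≤ num := by omega
    set k := num / x with hk
    have hnume : num = x * k := (Int.mul_ediv_cancel' hxd).symm
    have hkpos : 2 ≤ k := by nlinarith
    by_cases hxx : x * x ≤ num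
    · refine ⟨x, ⟨hx2, ?_⟩, ?_⟩
      · have := (int_le_sqrt hnum (by omega)).mpr hxx; omega
      · rw [if_pos ((PySem.Int.mod_eq_zero_iff_dvd num x).mpr hxd)]; simp
    · refine ⟨k, ⟨hkpos, ?_⟩, ?_⟩
      · have hkk : k * k ≤ num := by nlinarith
        have := (int_le_sqrt hnum (by omega)).mpr hkk; omega
      · have hkd : k ∣ num := ⟨x, by linarith [hnume]⟩
        rw [if_pos ((PySem.Int.mod_eq_zero_iff_dvd num k).mpr hkd)]
        rw [PySem.Int.floordiv_eq_ediv_of_pos (by omega)]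
        have : num / k = x := by
          rw [hnume]; exact Int.mul_ediv_cancel x (by omega)
        simp [this]

lemma qd_iff (num d : Int) :
    (d ∈ PySem.List.pyRange 2 num 1 ∧
      (decide (PySem.Int.mod num d = 0 ∧ PySem.Int.mod d 10 = 8 ∧ d ≠ 8)) = true)
    ↔ Qd num d := by
  rw [PySem.List.mem_pyRange_one]
  simp only [decide_eq_true_eq]
  unfold Qd
  rw [PySem.Int.mod_eq_zero_iff_dvd]
  tauto

lemma pairwise_le_pyRange (a b : Int) : (PySem.List.pyRange a b 1).Pairwise (· ≤ ·) :=
  (PySem.List.pairwise_lt_pyRange_one a b).imp le_of_lt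

lemma minQual_none {num : Int} (h : ∀ d, ¬ Qd num d) : minQual num = 0 := by
  unfold minQual
  rw [List.find?_eq_none.mpr]
  intro x hx
  simp only [Bool.not_eq_true, decide_eq_false_iff_not]
  intro hc
  exact h x ((qd_iff num x).mp ⟨hx, by simpa using hc⟩)

lemma minQual_some {num a : Int} (ha : Qd num a) (hmin : ∀ b, Qd num b → a ≤ b) :
    minQual num = a := by
  unfold minQual
  cases e : (PySem.List.pyRange 2 num 1).find?
      (fun d => decide (PySem.Int.mod num d = 0 ∧ PySem.Int.mod d 10 = 8 ∧ d ≠ 8)) with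
  | none =>
    rw [List.find?_eq_none] at e
    obtain ⟨hmem, hp⟩ := (qd_iff num a).mpr ha
    exact absurd hp (by simpa using e a hmem)
  | some b =>
    obtain ⟨hb, hpb, hminb⟩ := find?_min_sorted (pairwise_le_pyRange 2 num) e
    have hqb := (qd_iff num b).mp ⟨hb, hpb⟩
    obtain ⟨hmem, hp⟩ := (qd_iff num a).mpr ha
    have h1 := hmin b hqb
    have h2 := hminb a hmem hp
    simpa using le_antisymm h2 h1

lemma f_eq_minQual {num : Int} (hnum : 0 ≤ num) : f num = minQual num := by
  have hf : f num = (match (PySem.List.sorted (PySem.Set.ofList (dellList num)) (fun x => x) false).find?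
      (fun i => decide (PySem.Int.mod i 10 = 8 ∧ i ≠ 8)) with
    | some i => i
    | none => 0) := rfl
  rw [hf]
  unfold minQual
  rw [find?_eq_find?_of_sorted
    ((PySem.List.sorted_ofList_pairwise_lt (dellList num)).imp le_of_lt)
    (pairwise_le_pyRange 2 num)]
  intro x
  rw [PySem.List.mem_sorted, PySem.Set.mem_ofList, mem_dellList hnum, qd_iff num x]
  simp only [decide_eq_true_eq]
  unfold Qd
  tauto

lemma loop_eq_minQual (num : Int) (h0 : 0 ≤ num) (i big : Int) (h2 : 2 ≤ i)
    (I1 : ∀ d, Qd num d → d < i → False)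
    (I2 : (big = 0 ∧ ∀ d, Qd num d → num < d * d → num / d < i → False)
        ∨ (Qd num big ∧ num < big * big ∧ num / big < i ∧
            ∀ d, Qd num d → num < d * d → num / d < i → big ≤ d)) :
    fAltLoop num big i = minQual num := by
  rw [fAltLoop]
  by_cases hcond : i * i ≤ num
  · simp only [dif_pos hcond]
    have hilt : i < num := by nlinarith
    by_cases hmod : PySem.Int.mod num i = 0
    · rw [if_pos hmod]
      have hdvd : i ∣ num := (PySem.Int.mod_eq_zero_iff_dvd num i).mp hmod
      by_cases hq : PySem.Int.mod i 10 = 8 ∧ i ≠ 8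
      · rw [if_pos hq]
        have hqi : Qd num i := ⟨h2, hilt, hdvd, hq.1, hq.2⟩
        exact (minQual_some hqi (fun b hb => by
          by_contra hlt; push Not at hlt; exact I1 b hb hlt)).symm
      · rw [if_neg hq]
        have hde : PySem.Int.floordiv num i = num / i :=
          PySem.Int.floordiv_eq_ediv_of_pos (by omega)
        rw [hde]
        set d := num / i with hdd
        have hnume : num = i * d := (Int.mul_ediv_cancel' hdvd).symm
        have hdge : i ≤ d := by nlinarith
        have I1' : ∀ e, Qd num e → e < i + 1 → False := by
          intro e he hlt
          rcases lt_or_eq_of_le (by omega : e ≤ i) with h | h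
          · exact I1 e he h
          · exact hq (h ▸ ⟨he.2.2.2.1, he.2.2.2.2⟩)
        have cofactor_eq : ∀ e, e ∣ num → num / e = i → e = d := by
          intro e hed hei
          have h1 : num = e * i := by
            have := (Int.mul_ediv_cancel' hed).symm
            rw [hei] at this; exact this
          have : i * e = i * d := by linarith [hnume, h1]
          exact mul_left_cancel₀ (by omega : (i : Int) ≠ 0) this
        by_cases hqd : PySem.Int.mod d 10 = 8 ∧ d ≠ 8
        · rw [if_pos hqd]
          have hdne : d ≠ i := fun h => hq (h ▸ hqd)
          have hdgt : i < d := lt_of_le_of_ne hdge (Ne.symm hdne)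
          have hQd : Qd num d := ⟨by omega, by nlinarith, ⟨i, by linarith⟩, hqd.1, hqd.2⟩
          have hddq : num < d * d := by nlinarith
          have hdiv : num / d = i := by
            have hdne0 : d ≠ 0 := by omega
            rw [hnume]
            exact Int.mul_ediv_cancel i hdne0
          apply loop_eq_minQual num h0 (i + 1) d (by omega) I1'
          right
          refine ⟨hQd, hddq, by omega, ?_⟩
          intro e he hee hei
          by_cases hji : num / e < i
          · rcases I2 with ⟨_, hnone⟩ | ⟨hqb, hbb, hbi, hminb⟩
            · exact absurd (hnone e he hee hji) (fun h => h)
            · have hble : big ≤ e := hminb e he hee hji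
              -- d < big
              have hjb : num = big * (num / big) := (Int.mul_ediv_cancel' hqb.2.2.1).symm
              have hdlb : d < big := by nlinarith [hqb.1, hbb, hbi]
              omega
          · have hje : num / e = i := by omega
            have : e = d := cofactor_eq e he.2.2.1 hje
            omega
        · rw [if_neg hqd]
          apply loop_eq_minQual num h0 (i + 1) big (by omega) I1'
          have hnew : ∀ e, Qd num e → num / e = i → False := by
            intro e he hje
            have : e = d := cofactor_eq e he.2.2.1 hje
            exact hqd (this ▸ ⟨he.2.2.2.1, he.2.2.2.2⟩)
          rcases I2 with ⟨hb0, hnone⟩ | ⟨hqb, hbb, hbi, hminb⟩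
          · left
            refine ⟨hb0, ?_⟩
            intro e he hee hei
            by_cases hji : num / e < i
            · exact hnone e he hee hji
            · exact hnew e he (by omega)
          · right
            refine ⟨hqb, hbb, by omega, ?_⟩
            intro e he hee hei
            by_cases hji : num / e < i
            · exact hminb e he hee hji
            · exact absurd (hnew e he (by omega)) (fun h => h)
    · rw [if_neg hmod]
      apply loop_eq_minQual num h0 (i + 1) big (by omega)
      · intro e he hlt
        rcases lt_or_eq_of_le (by omega : e ≤ i) with h | h
        · exact I1 e he h
        · exact hmod ((PySem.Int.mod_eq_zero_iff_dvd num i).mpr (h ▸ he.2.2.1))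
      · have hnew : ∀ e, Qd num e → num / e = i → False := by
          intro e he hje
          have h1 : num = e * i := by
            have := (Int.mul_ediv_cancel' he.2.2.1).symm
            rw [hje] at this; exact this
          exact hmod ((PySem.Int.mod_eq_zero_iff_dvd num i).mpr ⟨e, by linarith⟩)
        rcases I2 with ⟨hb0, hnone⟩ | ⟨hqb, hbb, hbi, hminb⟩
        · left
          refine ⟨hb0, ?_⟩
          intro e he hee hei
          by_cases hji : num / e < i
          · exact hnone e he hee hji
          · exact hnew e he (by omega)
        · right
          refine ⟨hqb, hbb, by omega, ?_⟩
          intro e he hee hei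
          by_cases hji : num / e < i
          · exact hminb e he hee hji
          · exact absurd (hnew e he (by omega)) (fun h => h)
  · simp only [dif_neg hcond]
    have hall : ∀ d, Qd num d → num < d * d ∧ num / d < i := by
      intro d hd
      obtain ⟨hd2, hdlt, hdd, _, _⟩ := hd
      have h1 : num < d * d := by
        by_contra hle; push Not at hle
        refine I1 d ⟨hd2, hdlt, hdd, ‹_›, ‹_›⟩ ?_
        nlinarith
      refine ⟨h1, ?_⟩
      have hnume : num = d * (num / d) := (Int.mul_ediv_cancel' hdd).symm
      set j := num / d with hj
      have hnpos : 0 < num := by omega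
      have hj1 : 1 ≤ j := by nlinarith
      have hjj : j * j ≤ num := by nlinarith
      nlinarith [hcond]
    rcases I2 with ⟨rfl, hnone⟩ | ⟨hqb, hbb, hbi, hminb⟩
    · exact (minQual_none (fun d hd => hnone d hd (hall d hd).1 (hall d hd).2)).symm
    · exact (minQual_some hqb (fun b hb => hminb b hb (hall b hb).1 (hall b hb).2)).symm
termination_by (num + 1 - i).toNat
decreasing_by
  all_goals
    have hii : i ≤ i * i := by nlinarith [mul_self_nonneg i, mul_self_nonneg (i - 1)]
    omega


lemma f_alt_eq_minQual {num : Int} (hnum : 0 ≤ num) : f_alt num = minQual num := by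
  unfold f_alt
  apply loop_eq_minQual num hnum 2 0 (le_refl 2)
  · intro d hd hlt
    have := hd.1
    omega
  · left
    refine ⟨rfl, ?_⟩
    intro d hd hdd hj
    obtain ⟨hd2, hdlt, hddvd, _, _⟩ := hd
    have hnume : num = d * (num / d) := (Int.mul_ediv_cancel' hddvd).symm
    nlinarith

-- ===== VERDICT (by name: the statement is the Claim_ definition above) =====
theorem f_spec : Claim_equal_f := by
  intro num _ hpre
  unfold Spec_f
  rw [f_eq_minQual hpre, f_alt_eq_minQual hpre]

@[simp] theorem f_raises : Claim_raises_f := by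
  unfold Claim_raises_f
  exact ⟨fun num _ hr hp => by unfold Pre_f at hp; unfold Raises_f at hr; omega,
    by decide, by decide, by unfold f_alt pvRaiseWitness_f pvRaiseWitnessOut_f; rw [fAltLoop]; norm_num⟩
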